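-- pv_equiv track=rewrite | github.com/Abbasali-786/GreenPulse_Team | cli/agents/coach_agent/coach_agent.py | get_eco_level_message
-- ===== SOURCE A (Python) =====
-- ECO_LEVELS = {
--     0: {"name": "Sprout", "message": "You're just beginning your eco-journey! Every step counts!"},
--     50: {"name": "Sapling", "message": "You're growing strong! Keep nurturing those green habits!"},
--     150: {"name": "Canopy Hero", "message": "You're making a real impact! Your actions are spreading like a forest canopy!"},
--     300: {"name": "Forest Guardian", "message": "An inspiring protector of the planet! Your dedication is truly remarkable!"}
-- }
--
-- def get_eco_level_message(xp):
--     level_name = "Sprout"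
--     level_message = ECO_LEVELS[0]["message"]
--     for threshold, level_info in sorted(ECO_LEVELS.items(), reverse=True):
--         if xp >= threshold:
--             level_name = level_info["name"]
--             level_message = level_info["message"]
--             break
--     return f"You are now a **{level_name}**! {level_message}"
-- ===== SOURCE B (Python) =====
-- _NAMES = ["Sprout", "Sapling", "Canopy Hero", "Forest Guardian"]
-- _MESSAGES = [
--     "You're just beginning your eco-journey! Every step counts!",
--     "You're growing strong! Keep nurturing those green habits!",
--     "You're making a real impact! Your actions are spreading like a forest canopy!",
--     "An inspiring protector of the planet! Your dedication is truly remarkable!",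
-- ]
--
-- def get_eco_level_message(xp):
--     # tier index = number of positive thresholds passed (branch-free table lookup)
--     idx = (xp >= 50) + (xp >= 150) + (xp >= 300)
--     return f"You are now a **{_NAMES[idx]}**! {_MESSAGES[idx]}"
-- ===== Notes on version B (the rewrite author's own statement) =====
-- stated objective: alternative
-- what changed: Replaced the dict + sorted() + descending first-match scan by a branch-free arithmetic tier index (sum of boolean threshold comparisons) used to index two flat parallel tables.
import Mathlib
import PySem

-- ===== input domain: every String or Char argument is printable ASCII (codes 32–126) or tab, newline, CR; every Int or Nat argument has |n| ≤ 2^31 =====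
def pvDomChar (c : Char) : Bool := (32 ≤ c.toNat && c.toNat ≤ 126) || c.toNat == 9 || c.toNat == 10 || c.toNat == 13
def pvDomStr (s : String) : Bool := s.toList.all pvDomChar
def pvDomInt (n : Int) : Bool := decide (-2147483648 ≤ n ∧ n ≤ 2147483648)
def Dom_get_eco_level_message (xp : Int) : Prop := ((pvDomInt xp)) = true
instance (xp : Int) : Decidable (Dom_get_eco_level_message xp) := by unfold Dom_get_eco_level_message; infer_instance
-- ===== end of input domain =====

-- B replaces A's dict + sorted() + first-match scan by a branch-free arithmetic tier
-- index into two flat tables (objective: alternative).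

-- ===== PORT A =====
-- ECO_LEVELS as a Lean association list (dict of int -> {name, message}, here (name, message) pairs)
def ECO_LEVELS : PySem.Dict Int (String × String) :=
  PySem.Dict.ofList
  [(0, ("Sprout", "You're just beginning your eco-journey! Every step counts!")),
   (50, ("Sapling", "You're growing strong! Keep nurturing those green habits!")),
   (150, ("Canopy Hero", "You're making a real impact! Your actions are spreading like a forest canopy!")),
   (300, ("Forest Guardian", "An inspiring protector of the planet! Your dedication is truly remarkable!"))]

-- the loop with break: first item (descending thresholds) with xp >= threshold wins
def ecoLoop (xp : Int) (items : List (Int × (String × String))) (name msg : String) : String × String :=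
  match items with
  | [] => (name, msg)
  | (threshold, info) :: rest =>
      if xp ≥ threshold then (info.1, info.2)
      else ecoLoop xp rest name msg

def get_eco_level_message (xp : Int) : String :=
  let level_name := "Sprout"
  let level_message := (PySem.Dict.getD ECO_LEVELS (0 : Int) ("", "")).2
  -- sorted(items, reverse=True): thresholds are distinct, so sorting by the key (first
  -- component) is exact for Python tuple comparison here
  let r := ecoLoop xp (PySem.List.sorted ECO_LEVELS.items (fun p : Int × (String × String) => p.1) true)
                level_name level_message
  "You are now a **" ++ r.1 ++ "**! " ++ r.2

-- ===== PORT B =====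
def ecoNames : List String := ["Sprout", "Sapling", "Canopy Hero", "Forest Guardian"]
def ecoMessages : List String :=
  ["You're just beginning your eco-journey! Every step counts!",
   "You're growing strong! Keep nurturing those green habits!",
   "You're making a real impact! Your actions are spreading like a forest canopy!",
   "An inspiring protector of the planet! Your dedication is truly remarkable!"]

def get_eco_level_message_alt (xp : Int) : String :=
  -- idx = (xp >= 50) + (xp >= 150) + (xp >= 300): Python bools add as 0/1; idx ∈ [0,3],
  -- so the list indexings always succeed (getD default is never used)
  let idx : Int := (if xp ≥ 50 then 1 else 0) + (if xp ≥ 150 then 1 else 0) + (if xp ≥ 300 then 1 else 0)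
  "You are now a **" ++ (PySem.List.pyGet? ecoNames idx).getD "" ++ "**! " ++
    (PySem.List.pyGet? ecoMessages idx).getD ""

-- ===== PRECONDITION & SPEC =====
def Spec_get_eco_level_message (xp : Int) (out : String) : Prop := out = get_eco_level_message_alt xp
instance (xp : Int) (out : String) : Decidable (Spec_get_eco_level_message xp out) := by unfold Spec_get_eco_level_message; infer_instance

-- ===== CLAIM =====
def Claim_equal_get_eco_level_message : Prop := ∀ (xp : Int), Dom_get_eco_level_message xp → Spec_get_eco_level_message xp (get_eco_level_message xp)

-- ===== LEMMAS AND PROOFS =====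
theorem eco_eq (xp : Int) : get_eco_level_message xp = get_eco_level_message_alt xp := by
  simp only [get_eco_level_message, get_eco_level_message_alt]
  have hs : PySem.List.sorted ECO_LEVELS.items (fun p : Int × (String × String) => p.1) true =
      [(300, ("Forest Guardian", "An inspiring protector of the planet! Your dedication is truly remarkable!")),
       (150, ("Canopy Hero", "You're making a real impact! Your actions are spreading like a forest canopy!")),
       (50, ("Sapling", "You're growing strong! Keep nurturing those green habits!")),
       (0, ("Sprout", "You're just beginning your eco-journey! Every step counts!"))] := rfl
  rw [hs]
  simp only [ecoLoop]
  split_ifs <;> first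
    | rfl
    | omega

-- ===== VERDICT =====
theorem get_eco_level_message_spec : Claim_equal_get_eco_level_message := by
  intro xp _
  exact eco_eq xp
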